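-- pv_equiv track=rewrite | github.com/Do-code-ing/Python_Programmers | Coding_Test_Lv2/17_kakao_프렌즈4블록.py | solution
-- ===== SOURCE A (Python) =====
-- def solution(m, n, board):
--     answer = 0
--     graph = []
--     for i in board:
--         graph.append(list(i))
--
--     while True:
--         coord = set() # 터트릴 수 있는 블록 좌표 저장
--         for i in range(m-1):
--             for j in range(n-1):
--                 if graph[i][j] == 0:
--                     continue
--                 # 4 * 4 크기의 좌표 값 찾고 저장
--                 if [graph[i][j]] * 3 == [graph[i+1][j], graph[i][j+1], graph[i+1][j+1]]:
--                     coord.add((i, j))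
--                     coord.add((i+1, j))
--                     coord.add((i, j+1))
--                     coord.add((i+1, j+1))
--         # 더이상 터트릴 게 없다면 반환
--         if len(coord) == 0:
--             return answer
--         # 터트린 블록 수 추가
--         answer += len(coord)
--         # 터트리기
--         for x, y in coord:
--             graph[x][y] = 0
--         # 터트린 곳 매꿔주기
--         for i in range(m-1, -1, -1):
--             for j in range(n-1, -1, -1):
--                 if graph[i][j] == 0:
--                     x = i-1
--                     while graph[x][j] == 0 and x >= 0:
--                         x -= 1
--
--                     if x == -1:
--                         continue
--
--                     graph[i][j] = graph[x][j]
--                     graph[x][j] = 0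
-- ===== SOURCE B (Python) =====
-- def solution(m, n, board):
--     answer = 0
--     grid = [[c for c in row] for row in board]
--
--     while True:
--         marks = set()
--         for i in range(m - 1):
--             for j in range(n - 1):
--                 c = grid[i][j]
--                 if c != 0 and c == grid[i + 1][j] == grid[i][j + 1] == grid[i + 1][j + 1]:
--                     marks.update([(i, j), (i + 1, j), (i, j + 1), (i + 1, j + 1)])
--         if not marks:
--             return answer
--         answer += len(marks)
--         for i, j in marks:
--             grid[i][j] = 0
--         # gravity: stable per-column compaction instead of cell-by-cell pulling
--         for j in range(n):
--             col = [grid[i][j] for i in range(m) if grid[i][j] != 0]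
--             pad = m - len(col)
--             for i in range(m):
--                 grid[i][j] = 0 if i < pad else col[i - pad]
-- ===== Notes on version B (the rewrite author's own statement) =====
-- stated objective: simpler
-- what changed: B replaces A's gravity phase (nested reversed loops pulling each empty cell's nearest block down with an inner while scan, cell by cell) with a per-column gather-and-compact pass: collect each column's non-zero entries top-to-bottom and write back zeros followed by that list; detection builds the mark set via a chained comparison and a single set.update instead of A's skip-continue plus list-replication equality with four adds.
-- outside the precondition, e.g. on solution(2, 2, ['ab', 'cd', 'x', 'ef']): A returns 0, B returns 0; on solution(2, 2, ['ab', 'cd', 'x']): A returns 0, B returns 0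
import Mathlib
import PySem

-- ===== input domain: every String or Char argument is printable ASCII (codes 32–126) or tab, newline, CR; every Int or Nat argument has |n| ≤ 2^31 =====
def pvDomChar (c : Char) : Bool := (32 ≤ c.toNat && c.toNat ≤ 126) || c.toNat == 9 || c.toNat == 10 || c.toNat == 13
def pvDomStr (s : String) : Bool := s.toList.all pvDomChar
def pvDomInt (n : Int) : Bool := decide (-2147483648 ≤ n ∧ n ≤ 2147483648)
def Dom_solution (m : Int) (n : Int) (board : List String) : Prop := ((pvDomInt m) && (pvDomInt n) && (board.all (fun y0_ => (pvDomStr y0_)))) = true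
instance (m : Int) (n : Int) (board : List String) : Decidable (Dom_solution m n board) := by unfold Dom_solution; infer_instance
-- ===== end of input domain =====

-- B replaces A's cell-by-cell upward-pull gravity (nested reversed loops with an inner
-- while) by a per-column gather-and-compact pass; objective: simpler.

-- A cell: `some c` = the character, `none` = Python's 0 (a popped block)
abbrev Cell := Option Char
abbrev Grid := List (List Cell)

-- graph[x][j]; negative x wraps as in Python (the benign graph[-1][j] read); the
-- defaults [] / none are returned where Python would raise, which Pre_ excludes
def cellI (g : Grid) (x j : Int) : Cell :=
  PySem.List.pyGetD (PySem.List.pyGetD g x []) j none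

-- graph[x][j] = v; exact for 0 ≤ x, 0 ≤ j in range, which holds at every call site
def setCellI (g : Grid) (x j : Int) (v : Cell) : Grid :=
  g.modify x.toNat (fun row => row.set j.toNat v)

-- ===== PORT A =====
-- while graph[x][j] == 0 and x >= 0: x -= 1   (the fuel (x+1).toNat is exactly the
-- number of candidate positions left, so this recursion is exact)
def findXAgo (g : Grid) (j : Int) : Nat → Int → Int
  | 0, x => x
  | f + 1, x => if cellI g x j = none ∧ 0 ≤ x then findXAgo g j f (x - 1) else x

def findXA (g : Grid) (j : Int) (x : Int) : Int :=
  findXAgo g j (x + 1).toNat x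

-- body of A's gravity loops: pull the nearest block above into an empty cell
def dropCellA (g : Grid) (i j : Int) : Grid :=
  if cellI g i j = none then
    let x := findXA g j (i - 1)
    if x = -1 then g
    else setCellI (setCellI g i j (cellI g x j)) x j none
  else g

def gravityA (m n : Int) (g : Grid) : Grid :=
  (PySem.List.pyRange (m - 1) (-1) (-1)).foldl (fun g i =>
    (PySem.List.pyRange (n - 1) (-1) (-1)).foldl (fun g j => dropCellA g i j) g) g

def detectA (m n : Int) (g : Grid) : PySem.Set (Int × Int) :=
  (PySem.List.pyRange 0 (m - 1) 1).foldl (fun s i =>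
    (PySem.List.pyRange 0 (n - 1) 1).foldl (fun s j =>
      if cellI g i j = none then s
      else if [cellI g i j, cellI g i j, cellI g i j] =
              [cellI g (i+1) j, cellI g i (j+1), cellI g (i+1) (j+1)] then
        PySem.Set.add (PySem.Set.add (PySem.Set.add (PySem.Set.add s (i, j)) (i+1, j)) (i, j+1)) (i+1, j+1)
      else s) s) PySem.Set.empty

def popA (cs : List (Int × Int)) (g : Grid) : Grid :=
  cs.foldl (fun g p => setCellI g p.1 p.2 none) g

-- while True: …  (each round pops ≥ 1 block, so total cells + 1 rounds always suffice)
def loopA (m n : Int) : Nat → Grid → Int → Int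
  | 0, _, ans => ans
  | fuel + 1, g, ans =>
    let coord := detectA m n g
    if coord.length = 0 then ans
    else loopA m n fuel (gravityA m n (popA coord g)) (ans + (coord.length : Int))

def solution (m : Int) (n : Int) (board : List String) : Int :=
  loopA m n (board.foldl (fun a s => a + s.toList.length) 0 + 1)
    (board.foldl (fun g s => g ++ [s.toList.map some]) []) 0

-- ===== PORT B =====
def detectB (m n : Int) (g : Grid) : PySem.Set (Int × Int) :=
  (PySem.List.pyRange 0 (m - 1) 1).foldl (fun s i =>
    (PySem.List.pyRange 0 (n - 1) 1).foldl (fun s j =>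
      let c := cellI g i j
      if c ≠ none ∧ c = cellI g (i+1) j ∧ c = cellI g i (j+1) ∧ c = cellI g (i+1) (j+1) then
        PySem.Set.update s [(i, j), (i+1, j), (i, j+1), (i+1, j+1)]
      else s) s) PySem.Set.empty

def popB (cs : List (Int × Int)) (g : Grid) : Grid :=
  cs.foldl (fun g p => setCellI g p.1 p.2 none) g

-- col = [grid[i][j] for i in range(m) if grid[i][j] != 0]
def gatherColB (m : Int) (g : Grid) (j : Int) : List Cell :=
  ((PySem.List.pyRange 0 m 1).filter (fun i => cellI g i j ≠ none)).map (fun i => cellI g i j)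

-- grid[i][j] = 0 if i < m - len(col) else col[i - (m - len(col))]
def writeColB (m : Int) (g : Grid) (j : Int) (col : List Cell) : Grid :=
  (PySem.List.pyRange 0 m 1).foldl (fun g i =>
    setCellI g i j (if i < m - (col.length : Int) then none
                    else col.getD (i - (m - (col.length : Int))).toNat none)) g

def gravityB (m n : Int) (g : Grid) : Grid :=
  (PySem.List.pyRange 0 n 1).foldl (fun g j => writeColB m g j (gatherColB m g j)) g

def loopB (m n : Int) : Nat → Grid → Int → Int
  | 0, _, ans => ans
  | fuel + 1, g, ans =>
    let marks := detectB m n g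
    if marks.length = 0 then ans
    else loopB m n fuel (gravityB m n (popB marks g)) (ans + (marks.length : Int))

def solution_alt (m : Int) (n : Int) (board : List String) : Int :=
  loopB m n (board.foldl (fun a s => a + s.toList.length) 0 + 1)
    (board.map (fun s => s.toList.map (fun c => some c))) 0

-- ===== PRECONDITION & SPEC =====
-- Pre_ excludes ragged boards in the non-trivial case m ≥ 2 ∧ n ≥ 2 (fewer than m rows,
-- or some row shorter than n): on those A's first 2×2 scan generally raises IndexError;
-- on the few that A survives (short rows lying outside the m×n window) both return 0.
def Pre_solution (m : Int) (n : Int) (board : List String) : Prop :=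
  (m ≤ 1 ∨ n ≤ 1) ∨ (m ≤ (board.length : Int) ∧ ∀ s ∈ board, n ≤ PySem.Str.len s)
instance (m : Int) (n : Int) (board : List String) : Decidable (Pre_solution m n board) := by
  unfold Pre_solution; infer_instance
def pvWitness_solution : Int × Int × List String := (2, 2, ["ab", "cd"])

def Spec_solution (m : Int) (n : Int) (board : List String) (out : Int) : Prop := out = solution_alt m n board
instance (m : Int) (n : Int) (board : List String) (out : Int) : Decidable (Spec_solution m n board out) := by unfold Spec_solution; infer_instance

-- ===== CLAIM (what is proved, stated in full; the proofs are below) =====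
def Claim_equal_solution : Prop := ∀ (m : Int) (n : Int) (board : List String), Dom_solution m n board → Pre_solution m n board → Spec_solution m n board (solution m n board)

-- ===== LEMMAS AND PROOFS =====
def getCol (jn : Nat) (g : Grid) : List Cell := g.map (fun r => r.getD jn none)

lemma cell_col (g : Grid) (x : Int) (jn : Nat) :
    cellI g x (jn : Int) = PySem.List.pyGetD (getCol jn g) x none := by
  unfold cellI getCol
  calc PySem.List.pyGetD (PySem.List.pyGetD g x []) (jn : Int) none
      = (PySem.List.pyGetD g x []).getD jn none := by
        rw [PySem.List.pyGetD_of_nonneg _ _ (by positivity)]; simp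
    _ = PySem.List.pyGetD (g.map fun r => r.getD jn none) x (([] : List Cell).getD jn none) :=
        (PySem.List.pyGetD_map (fun r : List Cell => r.getD jn none) g x []).symm
    _ = PySem.List.pyGetD (g.map fun r => r.getD jn none) x none := rfl

def findColGo (c : List Cell) : Nat → Int → Int
  | 0, x => x
  | f + 1, x => if PySem.List.pyGetD c x none = none ∧ 0 ≤ x then findColGo c f (x - 1) else x

lemma findX_col (g : Grid) (jn : Nat) : ∀ (f : Nat) (x : Int),
    findXAgo g (jn : Int) f x = findColGo (getCol jn g) f x := by
  intro f
  induction f with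
  | zero => intro x; rfl
  | succ f ih => intro x; simp only [findXAgo, findColGo, cell_col, ih]

-- the per-cell A operation factored through its column
def colDrop (c : List Cell) (i : Int) : List Cell :=
  if PySem.List.pyGetD c i none = none then
    let x := findColGo c (i - 1 + 1).toNat (i - 1)
    if x = -1 then c
    else (c.set i.toNat (PySem.List.pyGetD c x none)).set x.toNat none
  else c

-- shape rigidity
lemma map_length_modify (f : List Cell → List Cell) (hf : ∀ r, (f r).length = r.length) :
    ∀ (g : Grid) (k : Nat), (g.modify k f).map List.length = g.map List.length := by
  intro g
  induction g with
  | nil => intro k; simp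
  | cons r t ih =>
    intro k
    cases k with
    | zero => simp [List.modify_zero_cons, hf]
    | succ k => simp [List.modify_succ_cons, ih]

lemma shape_setCellI (g : Grid) (x j : Int) (v : Cell) :
    (setCellI g x j v).map List.length = g.map List.length := by
  unfold setCellI
  exact map_length_modify _ (fun r => List.length_set ..) g x.toNat

lemma shape_foldl {α : Type} (f : Grid → α → Grid)
    (hf : ∀ g a, (f g a).map List.length = g.map List.length) :
    ∀ (L : List α) (g : Grid), (L.foldl f g).map List.length = g.map List.length := by
  intro L
  induction L with
  | nil => intro g; rfl
  | cons a t ih => intro g; rw [List.foldl_cons, ih, hf]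

lemma shape_dropCellA (g : Grid) (i j : Int) :
    (dropCellA g i j).map List.length = g.map List.length := by
  simp only [dropCellA]
  split_ifs <;> simp [shape_setCellI]

lemma shape_gravityA (m n : Int) (g : Grid) :
    (gravityA m n g).map List.length = g.map List.length := by
  unfold gravityA
  exact shape_foldl _ (fun g i => shape_foldl _ (fun g j => shape_dropCellA g i j) _ g) _ g

lemma shape_writeColB (m : Int) (g : Grid) (j : Int) (col : List Cell) :
    (writeColB m g j col).map List.length = g.map List.length := by
  unfold writeColB
  exact shape_foldl _ (fun g i => shape_setCellI ..) _ g

lemma shape_gravityB (m n : Int) (g : Grid) :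
    (gravityB m n g).map List.length = g.map List.length := by
  unfold gravityB
  exact shape_foldl _ (fun g j => shape_writeColB ..) _ g

lemma shape_popA (cs : List (Int × Int)) (g : Grid) :
    (popA cs g).map List.length = g.map List.length := by
  unfold popA
  exact shape_foldl _ (fun g p => shape_setCellI ..) _ g

lemma rows_of_shape {g g' : Grid} (h : g'.map List.length = g.map List.length)
    {P : Nat → Prop} (hg : ∀ r ∈ g, P r.length) : ∀ r ∈ g', P r.length := by
  intro r hr
  have : r.length ∈ g.map List.length := h ▸ List.mem_map_of_mem hr
  rcases List.mem_map.1 this with ⟨r0, hr0, he⟩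
  exact he ▸ hg r0 hr0

lemma length_of_shape {g g' : Grid} (h : g'.map List.length = g.map List.length) :
    g'.length = g.length := by
  have := congrArg List.length h
  simpa using this

-- getCol through setCellI
lemma getCol_setCellI_self (g : Grid) (x : Int) (jn : Nat) (v : Cell)
    (hg : ∀ r ∈ g, jn < r.length) :
    getCol jn (setCellI g x (jn : Int) v) = (getCol jn g).set x.toNat v := by
  unfold setCellI getCol
  rw [Int.toNat_natCast]
  generalize x.toNat = k
  induction g generalizing k with
  | nil => simp
  | cons r t ih =>
    cases k with
    | zero =>
      simp only [List.modify_zero_cons, List.map_cons, List.set_cons_zero]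
      congr 1
      have : jn < r.length := hg r (by simp)
      simp [List.getD, this]
    | succ k =>
      simp only [List.modify_succ_cons, List.map_cons, List.set_cons_succ]
      congr 1
      exact ih (fun r hr => hg r (by simp [hr])) k

lemma getCol_setCellI_ne (g : Grid) (x : Int) (j0n jn : Nat) (v : Cell) (hne : j0n ≠ jn) :
    getCol jn (setCellI g x (j0n : Int) v) = getCol jn g := by
  unfold setCellI getCol
  rw [Int.toNat_natCast]
  generalize x.toNat = k
  induction g generalizing k with
  | nil => simp
  | cons r t ih =>
    cases k with
    | zero =>
      simp only [List.modify_zero_cons, List.map_cons]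
      congr 1
      simp [List.getD, List.getElem?_set_ne (by omega : j0n ≠ jn)]
    | succ k =>
      simp only [List.modify_succ_cons, List.map_cons]
      congr 1
      exact ih k

lemma drop_col (g : Grid) (i : Int) (jn : Nat) (hg : ∀ r ∈ g, jn < r.length) :
    getCol jn (dropCellA g i (jn : Int)) = colDrop (getCol jn g) i := by
  simp only [dropCellA, colDrop, findXA, cell_col, findX_col]
  split_ifs with h1 h2
  · rfl
  · rw [getCol_setCellI_self _ _ _ _ (rows_of_shape (shape_setCellI ..) hg),
        getCol_setCellI_self _ _ _ _ hg]
  · rfl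

lemma drop_col_ne (g : Grid) (i : Int) (j0n jn : Nat) (hne : j0n ≠ jn) :
    getCol jn (dropCellA g i (j0n : Int)) = getCol jn g := by
  simp only [dropCellA]
  split_ifs <;>
    simp [getCol_setCellI_ne _ _ _ _ _ hne]

-- the Nat-level passes and their common value
def passA : Nat → List Cell → List Cell
  | 0, c => c
  | k + 1, c => passA k (colDrop c (k : Int))

def keptOf (c : List Cell) (k : Nat) : List Cell := (c.take k).filter (fun v => decide (v ≠ none))

def compactTo (c : List Cell) (k : Nat) : List Cell :=
  List.replicate (k - (keptOf c k).length) none ++ keptOf c k ++ c.drop k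

lemma length_colDrop (c : List Cell) (i : Int) : (colDrop c i).length = c.length := by
  simp only [colDrop]
  split_ifs <;> simp

lemma getD_pyGetD (c : List Cell) (k : Nat) :
    PySem.List.pyGetD c (k : Int) none = c.getD k none := by
  rw [PySem.List.pyGetD_of_nonneg _ _ (by positivity)]
  simp

lemma findColGo_step (c : List Cell) (k : Nat) :
    findColGo c (k + 1) (k : Int) =
      if c.getD k none = none then findColGo c k ((k : Int) - 1) else (k : Int) := by
  show (if PySem.List.pyGetD c (k : Int) none = none ∧ 0 ≤ (k : Int) then _ else _) = _
  rw [getD_pyGetD]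
  by_cases hc : c.getD k none = none
  · rw [if_pos ⟨hc, by positivity⟩, if_pos hc]
  · rw [if_neg (fun h => hc h.1), if_neg hc]

lemma findColGo_spec (c : List Cell) : ∀ (k : Nat), k ≤ c.length →
    (findColGo c k ((k : Int) - 1) = -1 ∧ ∀ i : Nat, i < k → c.getD i none = none) ∨
    (∃ xn : Nat, findColGo c k ((k : Int) - 1) = (xn : Int) ∧ xn < k ∧
      c.getD xn none ≠ none ∧ ∀ i : Nat, xn < i → i < k → c.getD i none = none) := by
  intro k
  induction k with
  | zero =>
    intro _
    left
    constructor
    · norm_num [findColGo]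
    · omega
  | succ k ih =>
    intro hk
    have hx : ((k + 1 : Nat) : Int) - 1 = (k : Int) := by push_cast; ring
    rw [hx, findColGo_step]
    by_cases hc : c.getD k none = none
    · rw [if_pos hc]
      rcases ih (by omega) with ⟨h1, h2⟩ | ⟨xn, h1, h2, h3, h4⟩
      · left
        refine ⟨h1, fun i hi => ?_⟩
        rcases Nat.lt_succ_iff_lt_or_eq.1 hi with h | h
        · exact h2 i h
        · exact h ▸ hc
      · right
        refine ⟨xn, h1, by omega, h3, fun i hxi hik => ?_⟩
        rcases Nat.lt_succ_iff_lt_or_eq.1 hik with h | h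
        · exact h4 i hxi h
        · exact h ▸ hc
    · rw [if_neg hc]
      exact Or.inr ⟨k, rfl, by omega, hc, by omega⟩

lemma kept_succ (c : List Cell) (k : Nat) (hk : k < c.length) :
    keptOf c (k + 1) =
      keptOf c k ++ (if c.getD k none ≠ none then [c.getD k none] else []) := by
  unfold keptOf
  rw [List.take_succ_eq_append_getElem hk, List.filter_append,
      ← List.getD_eq_getElem c none hk]
  generalize c.getD k none = a
  by_cases h : a = none <;> simp [h]

lemma all_none_filter (t : List Cell) (h : ∀ a ∈ t, a = none) :
    t.filter (fun v => decide (v ≠ none)) = [] := by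
  rw [List.filter_eq_nil_iff]
  intro a ha
  simp [h a ha]

lemma drop_succ_getD (c : List Cell) (k : Nat) (hk : k < c.length) :
    c.drop k = c.getD k none :: c.drop (k + 1) := by
  rw [List.drop_eq_getElem_cons hk, List.getD_eq_getElem c none hk]

lemma passA_step_eq (c : List Cell) (k : Nat) (hk : k < c.length) :
    compactTo (colDrop c (k : Int)) k = compactTo c (k + 1) := by
  have hfuel : ((k : Int) - 1 + 1).toNat = k := by omega
  have hdropk := drop_succ_getD c k hk
  by_cases hck : c.getD k none = none
  · -- an empty cell at position k
    have hpgk : PySem.List.pyGetD c ((k : Nat) : Int) none = none := by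
      rw [getD_pyGetD]; exact hck
    rcases findColGo_spec c k (le_of_lt hk) with ⟨hr, hall⟩ | ⟨xn, hr, hxk, hxnz, hseg⟩
    · -- nothing above it: colDrop is the identity, the whole column above is empty
      have hcd : colDrop c (k : Int) = c := by
        simp only [colDrop]
        rw [hpgk, if_pos rfl, hfuel, hr, if_pos rfl]
      have hkept : keptOf c k = [] := by
        apply all_none_filter
        intro a ha
        rcases List.mem_iff_getElem.1 ha with ⟨i, hi, rfl⟩
        have hik : i < k := by
          have := hi; simp only [List.length_take] at this; omega
        have e3 := hall i hik
        rw [List.getD_eq_getElem c none (by omega)] at e3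
        rw [List.getElem_take, e3]
      have hkept' : keptOf c (k + 1) = [] := by
        rw [kept_succ c k hk, hkept, if_neg (fun hno => hno hck)]
        simp
      unfold compactTo
      rw [hcd, hkept, hkept', hdropk, hck]
      simp [List.replicate_succ']
    · -- pull the block at xn (the lowest one above k) down into position k
      have hxn : xn < c.length := by omega
      have hrne : ¬((xn : Int) = -1) := by omega
      set a := c.getD xn none with hadef
      have hpgx : PySem.List.pyGetD c ((xn : Nat) : Int) none = a := by
        rw [getD_pyGetD]
      have hcd : colDrop c (k : Int) = (c.set k a).set xn none := by
        simp only [colDrop]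
        rw [hpgk, if_pos rfl, hfuel, hr, if_neg hrne, hpgx, Int.toNat_natCast,
          Int.toNat_natCast]
      have htlen : (c.take k).length = k := by simp; omega
      have htxn : xn < (c.take k).length := by omega
      have hta : (c.take k)[xn]'htxn = a := by
        rw [List.getElem_take]; exact (List.getD_eq_getElem c none hxn).symm
      have hrest : ∀ b ∈ (c.take k).drop (xn + 1), b = none := by
        intro b hb
        rcases List.mem_iff_getElem.1 hb with ⟨i, hi, rfl⟩
        have hlen2 : ((c.take k).drop (xn + 1)).length = k - (xn + 1) := by simp [htlen]
        have hik : xn + 1 + i < k := by omega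
        have e3 := hseg (xn + 1 + i) (by omega) hik
        rw [List.getD_eq_getElem c none (by omega)] at e3
        have e1 : ((c.take k).drop (xn + 1))[i]'hi = (c.take k)[xn + 1 + i]'(by omega) := by
          rw [List.getElem_drop]
        rw [e1, List.getElem_take]
        exact e3
      have hsetxn : (c.take k).set xn none
          = (c.take k).take xn ++ none :: (c.take k).drop (xn + 1) :=
        List.set_eq_take_cons_drop none htxn
      have htdecomp : c.take k = (c.take k).take xn ++ a :: (c.take k).drop (xn + 1) := by
        conv_lhs => rw [← List.take_append_drop (xn + 1) (c.take k),
          List.take_succ_eq_append_getElem htxn, hta]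
        simp
      have hane : a ≠ none := hxnz
      have hkept : keptOf c k
          = ((c.take k).take xn).filter (fun v => decide (v ≠ none)) ++ [a] := by
        unfold keptOf
        conv_lhs => rw [htdecomp]
        rw [List.filter_append, List.filter_cons, all_none_filter _ hrest]
        simp [hane]
      have hset : (c.set k a).set xn none
          = ((c.take k).set xn none) ++ a :: c.drop (k + 1) := by
        have h1 : c.set k a = c.take k ++ a :: c.drop (k + 1) :=
          List.set_eq_take_cons_drop a hk
        rw [h1, List.set_append_left _ _ (by omega)]
      have hulen : ((c.take k).set xn none).length = k := by simp [htlen]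
      have hkept2 : keptOf ((c.set k a).set xn none) k
          = ((c.take k).take xn).filter (fun v => decide (v ≠ none)) := by
        unfold keptOf
        rw [hset, List.take_left' hulen, hsetxn, List.filter_append, List.filter_cons,
          all_none_filter _ hrest]
        simp
      have hdrop2 : ((c.set k a).set xn none).drop k = a :: c.drop (k + 1) := by
        rw [hset, List.drop_left' hulen]
      have hkept3 : keptOf c (k + 1)
          = ((c.take k).take xn).filter (fun v => decide (v ≠ none)) ++ [a] := by
        rw [kept_succ c k hk, hkept, if_neg (fun hno => hno hck)]
        simp
      rw [hcd]
      unfold compactTo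
      rw [hkept2, hkept3, hdrop2]
      have harith : k + 1 - (((c.take k).take xn).filter (fun v => decide (v ≠ none)) ++ [a]).length
          = k - (((c.take k).take xn).filter (fun v => decide (v ≠ none))).length := by
        simp
      rw [harith]
      simp [List.append_assoc]
  · -- an occupied cell at position k: colDrop is the identity
    have hpgk : PySem.List.pyGetD c ((k : Nat) : Int) none = c.getD k none := getD_pyGetD c k
    have hcd : colDrop c (k : Int) = c := by
      simp only [colDrop]
      rw [hpgk, if_neg hck]
    rw [hcd]
    unfold compactTo
    rw [kept_succ c k hk, hdropk, if_pos hck]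
    generalize c.getD k none = a
    have harith : k + 1 - (keptOf c k ++ [a]).length = k - (keptOf c k).length := by
      simp
    rw [harith]
    simp [List.append_assoc]

lemma passA_eq : ∀ (k : Nat) (c : List Cell), k ≤ c.length → passA k c = compactTo c k := by
  intro k
  induction k with
  | zero => intro c _; simp [passA, compactTo, keptOf]
  | succ k ih =>
    intro c hk
    have hlen : (colDrop c (k : Int)).length = c.length := length_colDrop ..
    calc passA (k + 1) c = passA k (colDrop c (k : Int)) := rfl
      _ = compactTo (colDrop c (k : Int)) k := ih _ (by omega)
      _ = compactTo c (k + 1) := passA_step_eq c k (by omega)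

-- B's gather step computes exactly the kept blocks
lemma gatherN_eq_kept (c : List Cell) : ∀ (M : Nat), M ≤ c.length →
    ((List.range M).filter (fun i => decide (c.getD i none ≠ none))).map (fun i => c.getD i none)
      = keptOf c M := by
  intro M
  induction M with
  | zero => intro _; simp [keptOf]
  | succ M ih =>
    intro hM
    rw [List.range_succ, List.filter_append, List.map_append, ih (by omega),
      kept_succ c M (by omega)]
    congr 1
    by_cases h : c.getD M none = none
    · rw [if_neg (fun hno => hno h), List.filter_cons]
      rw [h]
      simp
    · rw [if_pos h, List.filter_cons]
      have hd : decide (c.getD M none ≠ none) = true := by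
        rw [decide_eq_true_iff]; exact h
      rw [hd]
      simp

-- pyRange bridges
lemma pyRange_down (t : Int) :
    PySem.List.pyRange (t - 1) (-1) (-1)
      = (List.range t.toNat).map (fun k : Nat => t - 1 - (k : Int)) := by
  rw [PySem.List.pyRange]
  norm_num
  by_cases ht : 0 < t
  · rw [if_pos ht]
    apply List.map_congr_left
    intro k _
    ring
  · rw [if_neg ht, show t.toNat = 0 by omega]
    rfl

lemma mem_pyRange_down {t x : Int} :
    x ∈ PySem.List.pyRange (t - 1) (-1) (-1) ↔ 0 ≤ x ∧ x < t := by
  rw [pyRange_down]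
  simp only [List.mem_map, List.mem_range]

  constructor
  · rintro ⟨k, hk, rfl⟩
    omega
  · rintro ⟨h1, h2⟩
    exact ⟨(t - 1 - x).toNat, by omega, by omega⟩

lemma nodup_pyRange_down (t : Int) : (PySem.List.pyRange (t - 1) (-1) (-1)).Nodup := by
  rw [pyRange_down]
  exact List.Nodup.map (fun a b h => by simp only at h; omega :
    Function.Injective (fun k : Nat => t - 1 - (k : Int))) List.nodup_range

lemma pyRange_nonpos (b : Int) (hb : b ≤ 0) : PySem.List.pyRange 0 b 1 = [] := by
  rw [PySem.List.pyRange_of_pos _ _ one_pos, if_neg (by omega)]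
  rfl

lemma pyRange_zero (n : Int) (hn : 0 ≤ n) :
    PySem.List.pyRange 0 n 1 = (List.range n.toNat).map (fun k : Nat => (k : Int)) := by
  have h := PySem.List.pyRange_zero_natCast n.toNat
  rwa [Int.toNat_of_nonneg hn] at h

lemma mem_pyRange_asc {b x : Int} : x ∈ PySem.List.pyRange 0 b 1 ↔ 0 ≤ x ∧ x < b := by
  rw [PySem.List.mem_pyRange_iff_of_pos one_pos]
  omega

lemma nodup_pyRange_asc (b : Int) : (PySem.List.pyRange 0 b 1).Nodup := by
  by_cases hb : 0 ≤ b
  · rw [pyRange_zero b hb]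
    exact List.Nodup.map (fun a b h => by simp only at h; omega :
      Function.Injective (fun k : Nat => (k : Int))) List.nodup_range
  · rw [pyRange_nonpos b (by omega)]
    exact List.nodup_nil

-- fold independence on the A side
lemma foldDrop_ne (i : Int) (jn : Nat) :
    ∀ (L : List Int) (g : Grid), (∀ j ∈ L, 0 ≤ j) → ((jn : Int) ∉ L) →
    getCol jn (L.foldl (fun g j => dropCellA g i j) g) = getCol jn g := by
  intro L
  induction L with
  | nil => intro g _ _; rfl
  | cons j0 t ih =>
    intro g hL hnm
    have h0 : 0 ≤ j0 := hL j0 (List.mem_cons_self ..)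
    have hne : j0.toNat ≠ jn := by
      intro h
      apply hnm
      have hx : (jn : Int) = j0 := by omega
      rw [hx]
      exact List.mem_cons_self ..
    rw [List.foldl_cons, ih _ (fun j hj => hL j (List.mem_cons_of_mem _ hj))
      (fun h => hnm (List.mem_cons_of_mem _ h))]
    have hj0 : j0 = ((j0.toNat : Nat) : Int) := by omega
    rw [hj0]
    exact drop_col_ne g i j0.toNat jn hne

lemma foldDrop_mem (i : Int) (jn : Nat) :
    ∀ (L : List Int) (g : Grid), (∀ j ∈ L, 0 ≤ j) → L.Nodup → ((jn : Int) ∈ L) →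
    (∀ r ∈ g, jn < r.length) →
    getCol jn (L.foldl (fun g j => dropCellA g i j) g) = colDrop (getCol jn g) i := by
  intro L
  induction L with
  | nil => intro g _ _ hmem; exact absurd hmem (List.not_mem_nil)
  | cons j0 t ih =>
    intro g hL hnd hmem hg
    rw [List.foldl_cons]
    by_cases hj : (jn : Int) = j0
    · subst hj
      rw [foldDrop_ne i jn t _ (fun j hj' => hL j (List.mem_cons_of_mem _ hj'))
        (List.nodup_cons.1 hnd).1]
      exact drop_col g i jn hg
    · have h0 : 0 ≤ j0 := hL j0 (List.mem_cons_self ..)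
      have hne : j0.toNat ≠ jn := fun h => hj (by omega)
      have hj0 : j0 = ((j0.toNat : Nat) : Int) := by omega
      have hstep : getCol jn (dropCellA g i j0) = getCol jn g := by
        rw [hj0]
        exact drop_col_ne g i j0.toNat jn hne
      have hmem' : (jn : Int) ∈ t := by
        rcases List.mem_cons.1 hmem with h | h
        · exact absurd h hj
        · exact h
      rw [ih _ (fun j hj' => hL j (List.mem_cons_of_mem _ hj')) (List.nodup_cons.1 hnd).2 hmem'
        (rows_of_shape (shape_dropCellA g i j0) hg), hstep]

lemma rowpass_col (n i : Int) (jn : Nat) (hn : (jn : Int) < n) (g : Grid)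
    (hg : ∀ r ∈ g, jn < r.length) :
    getCol jn ((PySem.List.pyRange (n - 1) (-1) (-1)).foldl (fun g j => dropCellA g i j) g)
      = colDrop (getCol jn g) i := by
  apply foldDrop_mem i jn _ g
  · intro j hj
    exact (mem_pyRange_down.1 hj).1
  · exact nodup_pyRange_down n
  · exact mem_pyRange_down.2 ⟨by positivity, hn⟩
  · exact hg

lemma rowpass_col_ne (n i : Int) (jn : Nat) (hn : ¬((jn : Int) < n)) (g : Grid) :
    getCol jn ((PySem.List.pyRange (n - 1) (-1) (-1)).foldl (fun g j => dropCellA g i j) g)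
      = getCol jn g := by
  apply foldDrop_ne i jn _ g
  · intro j hj
    exact (mem_pyRange_down.1 hj).1
  · intro hmem
    exact hn (mem_pyRange_down.1 hmem).2

lemma shape_rowpass (n i : Int) (g : Grid) :
    ((PySem.List.pyRange (n - 1) (-1) (-1)).foldl (fun g j => dropCellA g i j) g).map List.length
      = g.map List.length :=
  shape_foldl _ (fun g j => shape_dropCellA g i j) _ g

lemma fold_rowpass_col (n : Int) (jn : Nat) (hn : (jn : Int) < n) :
    ∀ (LI : List Int) (g : Grid), (∀ r ∈ g, jn < r.length) →
    getCol jn (LI.foldl (fun g i =>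
        (PySem.List.pyRange (n - 1) (-1) (-1)).foldl (fun g j => dropCellA g i j) g) g)
      = LI.foldl (fun c i => colDrop c i) (getCol jn g) := by
  intro LI
  induction LI with
  | nil => intro g _; rfl
  | cons i0 t ih =>
    intro g hg
    rw [List.foldl_cons, List.foldl_cons,
      ih _ (rows_of_shape (shape_rowpass n i0 g) hg), rowpass_col n i0 jn hn g hg]

lemma foldl_down_eq_pass : ∀ (M : Nat) (c : List Cell),
    ((List.range M).map (fun k : Nat => (M : Int) - 1 - (k : Int))).foldl (fun c i => colDrop c i) c
      = passA M c := by
  intro M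
  induction M with
  | zero => intro c; rfl
  | succ M ih =>
    intro c
    have hlist : (List.range (M + 1)).map (fun k : Nat => ((M + 1 : Nat) : Int) - 1 - (k : Int))
        = (M : Int) :: (List.range M).map (fun k : Nat => (M : Int) - 1 - (k : Int)) := by
      rw [List.range_succ_eq_map, List.map_cons, List.map_map]
      congr 1
      · push_cast; ring
      · apply List.map_congr_left
        intro k _
        simp only [Function.comp]
        push_cast
        ring
    rw [hlist, List.foldl_cons, ih]
    rfl

lemma gravA_col (m n : Int) (jn : Nat) (hn : (jn : Int) < n) (g : Grid)
    (hm : m ≤ (g.length : Int)) (hg : ∀ r ∈ g, jn < r.length) :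
    getCol jn (gravityA m n g) = compactTo (getCol jn g) m.toNat := by
  unfold gravityA
  rw [fold_rowpass_col n jn hn _ g hg, pyRange_down m]
  by_cases h0 : 0 ≤ m
  · obtain ⟨M, rfl⟩ : ∃ M : Nat, m = (M : Int) := ⟨m.toNat, (Int.toNat_of_nonneg h0).symm⟩
    rw [Int.toNat_natCast]
    rw [foldl_down_eq_pass M (getCol jn g)]
    apply passA_eq
    have : (getCol jn g).length = g.length := by simp [getCol]
    omega
  · have ht : m.toNat = 0 := by omega
    rw [ht]
    simp [compactTo, keptOf]

lemma gravA_col_ne (m n : Int) (jn : Nat) (hn : ¬((jn : Int) < n)) (g : Grid) :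
    getCol jn (gravityA m n g) = getCol jn g := by
  unfold gravityA
  generalize PySem.List.pyRange (m - 1) (-1) (-1) = LI
  induction LI generalizing g with
  | nil => rfl
  | cons i0 t ih =>
    rw [List.foldl_cons, ih, rowpass_col_ne n i0 jn hn g]

-- the B side, factored through its column
def padVal (m : Int) (col : List Cell) (i : Int) : Cell :=
  if i < m - (col.length : Int) then none
  else col.getD (i - (m - (col.length : Int))).toNat none

lemma write_col_self (m : Int) (jn : Nat) (col : List Cell) :
    ∀ (L : List Int) (g : Grid), (∀ r ∈ g, jn < r.length) →
    getCol jn (L.foldl (fun g i => setCellI g i (jn : Int) (padVal m col i)) g)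
      = L.foldl (fun c i => c.set i.toNat (padVal m col i)) (getCol jn g) := by
  intro L
  induction L with
  | nil => intro g _; rfl
  | cons i0 t ih =>
    intro g hg
    rw [List.foldl_cons, List.foldl_cons,
      ih _ (rows_of_shape (shape_setCellI ..) hg), getCol_setCellI_self _ _ _ _ hg]

lemma writeColB_col (m : Int) (jn : Nat) (col : List Cell) (g : Grid)
    (hg : ∀ r ∈ g, jn < r.length) :
    getCol jn (writeColB m g (jn : Int) col)
      = (PySem.List.pyRange 0 m 1).foldl (fun c i => c.set i.toNat (padVal m col i)) (getCol jn g) :=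
  write_col_self m jn col _ g hg

lemma writeColB_col_ne (m : Int) (j0n jn : Nat) (hne : j0n ≠ jn) (col : List Cell) :
    ∀ (g : Grid), getCol jn (writeColB m g (j0n : Int) col) = getCol jn g := by
  intro g
  show getCol jn ((PySem.List.pyRange 0 m 1).foldl
    (fun g i => setCellI g i (j0n : Int) (padVal m col i)) g) = getCol jn g
  generalize PySem.List.pyRange 0 m 1 = L
  induction L generalizing g with
  | nil => rfl
  | cons i0 t ih =>
    rw [List.foldl_cons, ih, getCol_setCellI_ne _ _ _ _ _ hne]

lemma gather_col (m : Int) (g : Grid) (jn : Nat) :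
    gatherColB m g (jn : Int)
      = ((PySem.List.pyRange 0 m 1).filter
          (fun i => PySem.List.pyGetD (getCol jn g) i none ≠ none)).map
          (fun i => PySem.List.pyGetD (getCol jn g) i none) := by
  unfold gatherColB
  simp only [cell_col]

lemma set_append_length (u w : List Cell) (a v : Cell) :
    (u ++ a :: w).set u.length v = u ++ v :: w := by
  induction u with
  | nil => rfl
  | cons b t ih => simp [ih]

lemma foldl_set_pad (v : Int → Cell) (pad : List Cell) (c : List Cell)
    (hpc : pad.length ≤ c.length)
    (hv : ∀ k : Nat, k < pad.length → v ((k : Nat) : Int) = pad.getD k none) :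
    ∀ (K : Nat), K ≤ pad.length →
    ((List.range K).map (fun k : Nat => (k : Int))).foldl (fun c' i => c'.set i.toNat (v i)) c
      = pad.take K ++ c.drop K := by
  intro K
  induction K with
  | zero => simp
  | succ K ih =>
    intro hK
    rw [List.range_succ, List.map_append, List.foldl_append, ih (by omega)]
    simp only [List.map_cons, List.map_nil, List.foldl_cons, List.foldl_nil, Int.toNat_natCast]
    rw [hv K (by omega)]
    have hu : (pad.take K).length = K := by simp; omega
    have hdk : c.drop K = c.getD K none :: c.drop (K + 1) := drop_succ_getD c K (by omega)
    rw [hdk]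
    have hset := set_append_length (pad.take K) (c.drop (K + 1)) (c.getD K none) (pad.getD K none)
    rw [hu] at hset
    rw [hset, List.take_succ_eq_append_getElem (by omega : K < pad.length),
      ← List.getD_eq_getElem pad none (by omega : K < pad.length)]
    simp

lemma gravityB_unfold (m n : Int) (g : Grid) :
    gravityB m n g = (PySem.List.pyRange 0 n 1).foldl
      (fun g j => writeColB m g j (gatherColB m g j)) g := rfl

lemma colB_eq_compact (m : Int) (c : List Cell) (hm : m ≤ (c.length : Int)) :
    (PySem.List.pyRange 0 m 1).foldl
      (fun c' i => c'.set i.toNat (padVal m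
        (((PySem.List.pyRange 0 m 1).filter (fun i => PySem.List.pyGetD c i none ≠ none)).map
          (fun i => PySem.List.pyGetD c i none)) i)) c
      = compactTo c m.toNat := by
  by_cases h0 : 0 ≤ m
  · obtain ⟨M, rfl⟩ : ∃ M : Nat, m = (M : Int) := ⟨m.toNat, (Int.toNat_of_nonneg h0).symm⟩
    have hMc : M ≤ c.length := by
      have := hm; omega
    rw [pyRange_zero _ (by positivity), Int.toNat_natCast]
    have hcol : (((List.range M).map (fun k : Nat => (k : Int))).filter
          (fun i => PySem.List.pyGetD c i none ≠ none)).map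
          (fun i => PySem.List.pyGetD c i none) = keptOf c M := by
      rw [List.filter_map, List.map_map]
      have e1 : ((fun i : Int => decide (PySem.List.pyGetD c i none ≠ none))
            ∘ (fun k : Nat => (k : Int)))
          = (fun k : Nat => decide (c.getD k none ≠ none)) := by
        funext k
        simp [Function.comp]
      have e2 : ((fun i : Int => PySem.List.pyGetD c i none) ∘ (fun k : Nat => (k : Int)))
          = (fun k : Nat => c.getD k none) := by
        funext k
        simp [Function.comp]
      rw [e1, e2]
      exact gatherN_eq_kept c M hMc
    rw [hcol]
    have hcl : (keptOf c M).length ≤ M := by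
      unfold keptOf
      calc ((c.take M).filter (fun v => decide (v ≠ none))).length
          ≤ (c.take M).length := List.length_filter_le _ _
        _ ≤ M := by simp
    have hpadlen : (List.replicate (M - (keptOf c M).length) (none : Cell)
        ++ keptOf c M).length = M := by
      simp
      omega
    have hv : ∀ k : Nat, k < (List.replicate (M - (keptOf c M).length) (none : Cell)
          ++ keptOf c M).length →
        padVal (M : Int) (keptOf c M) ((k : Nat) : Int)
          = (List.replicate (M - (keptOf c M).length) (none : Cell) ++ keptOf c M).getD k none := by
      intro k hk
      rw [hpadlen] at hk
      unfold padVal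
      by_cases hsmall : k < M - (keptOf c M).length
      · rw [if_pos (by omega)]
        have hk2 : k < (List.replicate (M - (keptOf c M).length) (none : Cell)).length := by
          simp only [List.length_replicate]; omega
        rw [List.getD_eq_getElem _ none (by rw [hpadlen]; omega),
          List.getElem_append_left hk2]
        simp
      · rw [if_neg (by omega)]
        have hidx : ((k : Int) - ((M : Int) - ((keptOf c M).length : Int))).toNat
            = k - (M - (keptOf c M).length) := by omega
        have hk2 : k < (List.replicate (M - (keptOf c M).length) (none : Cell)
            ++ keptOf c M).length := by
          rw [hpadlen]; omega
        have hrep : (List.replicate (M - (keptOf c M).length) (none : Cell)).length ≤ k := by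
          simp only [List.length_replicate]; omega
        rw [hidx, List.getD_eq_getElem _ none hk2, List.getElem_append_right hrep,
          List.getD_eq_getElem _ none
            (by omega : k - (M - (keptOf c M).length) < (keptOf c M).length)]
        congr 1
        simp only [List.length_replicate]
    rw [foldl_set_pad _ _ c (by omega) hv M (by omega), List.take_of_length_le (by omega)]
    unfold compactTo
    simp [List.append_assoc]
  · rw [pyRange_nonpos m (by omega)]
    simp [compactTo, keptOf, show m.toNat = 0 by omega]

lemma foldWrite_ne (m : Int) (jn : Nat) :
    ∀ (L : List Int) (g : Grid), (∀ j ∈ L, 0 ≤ j) → ((jn : Int) ∉ L) →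
    getCol jn (L.foldl (fun g j => writeColB m g j (gatherColB m g j)) g) = getCol jn g := by
  intro L
  induction L with
  | nil => intro g _ _; rfl
  | cons j0 t ih =>
    intro g hL hnm
    have h0 : 0 ≤ j0 := hL j0 (List.mem_cons_self ..)
    have hne : j0.toNat ≠ jn := by
      intro h
      apply hnm
      have hx : (jn : Int) = j0 := by omega
      rw [hx]
      exact List.mem_cons_self ..
    have hj0 : j0 = ((j0.toNat : Nat) : Int) := by omega
    rw [List.foldl_cons, ih _ (fun j hj => hL j (List.mem_cons_of_mem _ hj))
      (fun h => hnm (List.mem_cons_of_mem _ h))]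
    rw [hj0, writeColB_col_ne m j0.toNat jn hne _ g]

lemma foldWrite_mem (m : Int) (jn : Nat) :
    ∀ (L : List Int) (g : Grid), (∀ j ∈ L, 0 ≤ j) → L.Nodup → ((jn : Int) ∈ L) →
    (∀ r ∈ g, jn < r.length) → m ≤ (g.length : Int) →
    getCol jn (L.foldl (fun g j => writeColB m g j (gatherColB m g j)) g)
      = compactTo (getCol jn g) m.toNat := by
  intro L
  induction L with
  | nil => intro g _ _ hmem; exact absurd hmem (List.not_mem_nil)
  | cons j0 t ih =>
    intro g hL hnd hmem hg hm
    rw [List.foldl_cons]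
    by_cases hj : (jn : Int) = j0
    · subst hj
      rw [foldWrite_ne m jn t _ (fun j hj' => hL j (List.mem_cons_of_mem _ hj'))
        (List.nodup_cons.1 hnd).1]
      rw [gather_col m g jn, writeColB_col m jn _ g hg]
      exact colB_eq_compact m (getCol jn g) (by simp [getCol]; omega)
    · have h0 : 0 ≤ j0 := hL j0 (List.mem_cons_self ..)
      have hne : j0.toNat ≠ jn := fun h => hj (by omega)
      have hj0 : j0 = ((j0.toNat : Nat) : Int) := by omega
      have hstep : getCol jn (writeColB m g j0 (gatherColB m g j0)) = getCol jn g := by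
        rw [hj0, writeColB_col_ne m j0.toNat jn hne _ g]
      have hmem' : (jn : Int) ∈ t := by
        rcases List.mem_cons.1 hmem with h | h
        · exact absurd h hj
        · exact h
      rw [ih _ (fun j hj' => hL j (List.mem_cons_of_mem _ hj')) (List.nodup_cons.1 hnd).2 hmem'
        (rows_of_shape (shape_writeColB ..) hg)
        (by rw [length_of_shape (shape_writeColB ..)]; exact hm), hstep]

lemma gravB_col (m n : Int) (jn : Nat) (hn : (jn : Int) < n) (g : Grid)
    (hm : m ≤ (g.length : Int)) (hg : ∀ r ∈ g, jn < r.length) :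
    getCol jn (gravityB m n g) = compactTo (getCol jn g) m.toNat := by
  rw [gravityB_unfold]
  apply foldWrite_mem m jn _ g
  · intro j hj
    exact (mem_pyRange_asc.1 hj).1
  · exact nodup_pyRange_asc n
  · exact mem_pyRange_asc.2 ⟨by positivity, hn⟩
  · exact hg
  · exact hm

lemma gravB_col_ne (m n : Int) (jn : Nat) (hn : ¬((jn : Int) < n)) (g : Grid) :
    getCol jn (gravityB m n g) = getCol jn g := by
  rw [gravityB_unfold]
  apply foldWrite_ne m jn _ g
  · intro j hj
    exact (mem_pyRange_asc.1 hj).1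
  · intro hmem
    exact hn (mem_pyRange_asc.1 hmem).2

-- the two gravity phases agree
lemma grids_eq (g1 g2 : Grid) (hs : g1.map List.length = g2.map List.length)
    (hc : ∀ jn : Nat, getCol jn g1 = getCol jn g2) : g1 = g2 := by
  apply List.ext_getElem (length_of_shape hs)
  intro i h1 h2
  have hrow : g1[i].length = g2[i].length := by
    have := congrArg (fun l => l[i]?) hs
    simp only [List.getElem?_map] at this
    rw [List.getElem?_eq_getElem h1, List.getElem?_eq_getElem h2] at this
    simpa using this
  apply List.ext_getElem hrow
  intro jn hj1 hj2
  have e1 : (getCol jn g1)[i]'(by simp [getCol]; omega) = g1[i].getD jn none := by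
    simp [getCol]
  have e2 : (getCol jn g2)[i]'(by simp [getCol]; omega) = g2[i].getD jn none := by
    simp [getCol]
  have := hc jn
  have e3 : (getCol jn g1)[i]'(by simp [getCol]; omega)
      = (getCol jn g2)[i]'(by simp [getCol]; omega) := by
    congr 1
  rw [e1, e2] at e3
  rwa [List.getD_eq_getElem _ none hj1, List.getD_eq_getElem _ none hj2] at e3

lemma gravity_eq (m n : Int) (g : Grid) (hm : m ≤ (g.length : Int))
    (hg : ∀ r ∈ g, n ≤ (r.length : Int)) : gravityA m n g = gravityB m n g := by
  apply grids_eq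
  · rw [shape_gravityA, shape_gravityB]
  · intro jn
    by_cases hn : (jn : Int) < n
    · have hrows : ∀ r ∈ g, jn < r.length := fun r hr => by have := hg r hr; omega
      rw [gravA_col m n jn hn g hm hrows, gravB_col m n jn hn g hm hrows]
    · rw [gravA_col_ne m n jn hn g, gravB_col_ne m n jn hn g]

-- detection agrees
lemma detect_eq (m n : Int) (g : Grid) : detectA m n g = detectB m n g := by
  unfold detectA detectB
  apply PySem.List.foldl_congr_mem
  intro s i _
  apply PySem.List.foldl_congr_mem
  intro s j _
  have hzeta :
      (let c := cellI g i j;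
        if c ≠ none ∧ c = cellI g (i+1) j ∧ c = cellI g i (j+1) ∧ c = cellI g (i+1) (j+1) then
          PySem.Set.update s [(i, j), (i+1, j), (i, j+1), (i+1, j+1)]
        else s)
      = (if cellI g i j ≠ none ∧ cellI g i j = cellI g (i+1) j ∧ cellI g i j = cellI g i (j+1)
            ∧ cellI g i j = cellI g (i+1) (j+1) then
          PySem.Set.update s [(i, j), (i+1, j), (i, j+1), (i+1, j+1)]
        else s) := rfl
  rw [hzeta]
  by_cases hc : cellI g i j = none
  · rw [if_pos hc, if_neg (by simp [hc])]
  · rw [if_neg hc]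
    by_cases h2 : [cellI g i j, cellI g i j, cellI g i j] =
        [cellI g (i+1) j, cellI g i (j+1), cellI g (i+1) (j+1)]
    · have h3 : cellI g i j = cellI g (i+1) j ∧ cellI g i j = cellI g i (j+1)
          ∧ cellI g i j = cellI g (i+1) (j+1) := by
        simpa using h2
      rw [if_pos h2, if_pos ⟨hc, h3.1, h3.2.1, h3.2.2⟩]
      simp [PySem.Set.update_cons, PySem.Set.update_nil]
    · rw [if_neg h2,
        if_neg (fun hco => h2 (by rw [← hco.2.1, ← hco.2.2.1, ← hco.2.2.2]))]

-- the popping loops are literally the same fold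
lemma pop_eq (cs : List (Int × Int)) (g : Grid) : popB cs g = popA cs g := rfl

-- the main loops agree step by step
lemma loop_eq (m n : Int) : ∀ (fuel : Nat) (g : Grid) (ans : Int),
    m ≤ (g.length : Int) → (∀ r ∈ g, n ≤ (r.length : Int)) →
    loopA m n fuel g ans = loopB m n fuel g ans := by
  intro fuel
  induction fuel with
  | zero => intros; rfl
  | succ fuel ih =>
    intro g ans hm hg
    simp only [loopA, loopB]
    rw [← detect_eq m n g]
    by_cases hempty : (detectA m n g).length = 0
    · rw [if_pos hempty, if_pos hempty]
    · rw [if_neg hempty, if_neg hempty, pop_eq,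
        gravity_eq m n (popA (detectA m n g) g)
          (by rw [length_of_shape (shape_popA (detectA m n g) g)]; exact hm)
          (rows_of_shape (shape_popA (detectA m n g) g)
            (P := fun l => n ≤ (l : Int)) hg)]
      apply ih
      · rw [length_of_shape (shape_gravityB m n (popA (detectA m n g) g)),
          length_of_shape (shape_popA (detectA m n g) g)]
        exact hm
      · exact rows_of_shape (shape_gravityB m n (popA (detectA m n g) g))
          (P := fun l => n ≤ (l : Int))
          (rows_of_shape (shape_popA (detectA m n g) g) (P := fun l => n ≤ (l : Int)) hg)

-- trivial boards: with n ≤ 1 nothing is ever detected and both return the answer as is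
lemma detectA_trivial (m n : Int) (hn : n ≤ 1) (g : Grid) :
    detectA m n g = PySem.Set.empty := by
  unfold detectA
  rw [show PySem.List.pyRange 0 (n - 1) 1 = [] from pyRange_nonpos _ (by omega)]
  simp only [List.foldl_nil]
  exact PySem.List.foldl_ignore ..

lemma detectB_trivial (m n : Int) (hn : n ≤ 1) (g : Grid) :
    detectB m n g = PySem.Set.empty := by
  unfold detectB
  rw [show PySem.List.pyRange 0 (n - 1) 1 = [] from pyRange_nonpos _ (by omega)]
  simp only [List.foldl_nil]
  exact PySem.List.foldl_ignore ..

lemma detectA_trivial_m (m n : Int) (hm : m ≤ 1) (g : Grid) :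
    detectA m n g = PySem.Set.empty := by
  unfold detectA
  rw [show PySem.List.pyRange 0 (m - 1) 1 = [] from pyRange_nonpos _ (by omega)]
  rfl

lemma detectB_trivial_m (m n : Int) (hm : m ≤ 1) (g : Grid) :
    detectB m n g = PySem.Set.empty := by
  unfold detectB
  rw [show PySem.List.pyRange 0 (m - 1) 1 = [] from pyRange_nonpos _ (by omega)]
  rfl

lemma loopA_trivial_m (m n : Int) (hm : m ≤ 1) (F : Nat) (g : Grid) (ans : Int) :
    loopA m n (F + 1) g ans = ans := by
  simp only [loopA, detectA_trivial_m m n hm]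
  rfl

lemma loopB_trivial_m (m n : Int) (hm : m ≤ 1) (F : Nat) (g : Grid) (ans : Int) :
    loopB m n (F + 1) g ans = ans := by
  simp only [loopB, detectB_trivial_m m n hm]
  rfl

lemma loopA_trivial (m n : Int) (hn : n ≤ 1) (F : Nat) (g : Grid) (ans : Int) :
    loopA m n (F + 1) g ans = ans := by
  simp only [loopA, detectA_trivial m n hn]
  rfl

lemma loopB_trivial (m n : Int) (hn : n ≤ 1) (F : Nat) (g : Grid) (ans : Int) :
    loopB m n (F + 1) g ans = ans := by
  simp only [loopB, detectB_trivial m n hn]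
  rfl

-- ===== VERDICT (by name: the statement is the Claim_ definition above) =====
theorem solution_spec : Claim_equal_solution := by
  intro m n board _ hpre
  unfold Spec_solution solution solution_alt
  rw [PySem.List.foldl_append_singleton_eq_map]
  simp only [List.nil_append]
  rcases hpre with htriv | ⟨hm, hrows⟩
  · rcases htriv with hm1 | hn1
    · rw [loopA_trivial_m m n hm1, loopB_trivial_m m n hm1]
    · rw [loopA_trivial m n hn1, loopB_trivial m n hn1]
  · apply loop_eq
    · simpa using hm
    · intro r hr
      rcases List.mem_map.1 hr with ⟨s, hs, rfl⟩
      have := hrows s hs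
      rw [PySem.Str.len_eq] at this
      simpa using this
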